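-- pv_equiv track=rewrite | github.com/jachin/AdventOfCodeSolutions | 2017/06_day/find-the-starting-position.py | balance_memory
-- ===== SOURCE A (Python) =====
-- def find_max_index(registers):
--     max = 0
--     max_i = 0
--
--     for i, n in enumerate(registers):
--         if n > max:
--             max = n
--             max_i = i
--
--     return max_i
--
-- def balance_memory(registers):
--     max_i = find_max_index(registers)
--     number_of_blocks = registers[max_i]
--
--     registers[max_i] = 0
--     i = 1
--     while number_of_blocks > 0:
--
--         index = (max_i + i) % len(registers)
--
--         registers[index] += 1
--         number_of_blocks -= 1
--         i += 1
--     return registers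
-- ===== SOURCE B (Python) =====
-- def balance_memory(registers):
--     # Closed-form redistribution: give every register blocks // n, and one
--     # extra block to each of the blocks % n positions after the max register.
--     n = len(registers)
--     blocks = max(registers)
--     max_i = registers.index(blocks)
--     registers[max_i] = 0
--     q, r = divmod(blocks, n)
--     registers[:] = [v + q + (1 if 1 <= (j - max_i) % n <= r else 0)
--                     for j, v in enumerate(registers)]
--     return registers
-- ===== Notes on version B (the rewrite author's own statement) =====
-- stated objective: faster
-- what changed: A deals the max register's B blocks one at a time around the ring in a while loop; B computes each register's share in closed form (everyone gets B//n, the next B%n positions after the max get one extra) in one pass. Pre_ excludes the empty list (A raises IndexError) and all-nonpositive lists with a negative register: negative block counts are outside the memory-reallocation domain, and there A's 0-seeded running max accidentally picks index 0 instead of the maximum's index.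
-- outside the precondition, e.g. on balance_memory([-1, -2]): A returns [0, -2], B returns [-1, -2]
import Mathlib
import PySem

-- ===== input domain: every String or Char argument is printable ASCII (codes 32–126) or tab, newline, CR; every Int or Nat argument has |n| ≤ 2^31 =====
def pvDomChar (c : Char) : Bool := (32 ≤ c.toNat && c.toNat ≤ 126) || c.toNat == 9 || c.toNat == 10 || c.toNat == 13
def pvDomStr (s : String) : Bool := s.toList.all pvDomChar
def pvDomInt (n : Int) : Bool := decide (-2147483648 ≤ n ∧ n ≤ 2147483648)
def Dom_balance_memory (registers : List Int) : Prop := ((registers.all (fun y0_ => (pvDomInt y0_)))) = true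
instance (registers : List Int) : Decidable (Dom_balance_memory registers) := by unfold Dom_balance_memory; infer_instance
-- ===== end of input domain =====

-- B replaces A's one-block-at-a-time while loop by a closed-form division
-- (everyone gets blocks//n, the next blocks%n positions one extra); both mutate
-- the list in place in Python, the equivalence proved here is about the return value.

-- ===== PORT A =====
def find_max_index (registers : List Int) : Int :=
  ((PySem.List.enumerate registers 0).foldl
    (fun (st : Int × Int) p => if p.2 > st.1 then (p.2, p.1) else st) (0, 0)).2

-- the while loop; number_of_blocks decreases by exactly 1 per iteration, so
-- fuel = number_of_blocks.toNat makes the recursion run exactly as the loop.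
def bmLoop (regs : List Int) (max_i number_of_blocks i : Int) : Nat → List Int
  | 0 => regs
  | fuel + 1 =>
    if number_of_blocks > 0 then
      let index := PySem.Int.mod (max_i + i) (regs.length : Int)
      bmLoop (PySem.List.pySetD regs index (PySem.List.pyGetD regs index 0 + 1))
        max_i (number_of_blocks - 1) (i + 1) fuel
    else regs

def balance_memory (registers : List Int) : List Int :=
  let max_i := find_max_index registers
  let number_of_blocks := (PySem.List.pyGet? registers max_i).getD 0
  let regs := PySem.List.pySetD registers max_i 0
  bmLoop regs max_i number_of_blocks 1 number_of_blocks.toNat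

-- ===== PORT B =====
def balance_memory_alt (registers : List Int) : List Int :=
  let n : Int := (registers.length : Int)
  let blocks : Int := (PySem.List.max? registers (fun y => y)).getD 0
  let max_i : Int := (((PySem.List.index? registers blocks).getD 0 : Nat) : Int)
  let regs := PySem.List.pySetD registers max_i 0
  let q := PySem.Int.floordiv blocks n
  let r := PySem.Int.mod blocks n
  (PySem.List.enumerate regs 0).map (fun p =>
    p.2 + q + (if 1 ≤ PySem.Int.mod (p.1 - max_i) n ∧ PySem.Int.mod (p.1 - max_i) n ≤ r then 1 else 0))

-- ===== PRECONDITION & SPEC =====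
-- Pre_ excludes the empty list, on which A raises IndexError, and lists whose every
-- register is ≤ 0 with some negative: negative block counts are outside the
-- memory-reallocation task's domain, and there A's 0-seeded running max accidentally
-- picks index 0 instead of the maximum's index.
def Pre_balance_memory (registers : List Int) : Prop :=
  registers ≠ [] ∧ ((∃ x ∈ registers, 0 < x) ∨ ∀ x ∈ registers, 0 ≤ x)
instance (registers : List Int) : Decidable (Pre_balance_memory registers) := by
  unfold Pre_balance_memory; infer_instance

def pvWitness_balance_memory : List Int := [0, 2, 7, 0]

def Spec_balance_memory (registers : List Int) (out : List Int) : Prop := out = balance_memory_alt registers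
instance (registers : List Int) (out : List Int) : Decidable (Spec_balance_memory registers out) := by unfold Spec_balance_memory; infer_instance

-- ===== CLAIM (what is proved, stated in full; the proofs are below) =====
def Claim_equal_balance_memory : Prop := ∀ (registers : List Int), Dom_balance_memory registers → Pre_balance_memory registers → Spec_balance_memory registers (balance_memory registers)

-- ===== LEMMAS AND PROOFS =====

-- cnt n s j b = how many of the b blocks dealt at positions s, s+1, … (mod n) land on index j
def cnt (n s j : Int) : Nat → Int
  | 0 => 0
  | b + 1 => (if PySem.Int.mod s n = j then 1 else 0) + cnt n (s + 1) j b

lemma emod_sub_self_emod (a n : Int) : (a % n - a) % n = 0 := by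
  have h : a % n - a = n * (-(a / n)) := by
    have := Int.mul_ediv_add_emod a n
    ring_nf
    linarith
  rw [h, Int.mul_emod_right]

lemma bmLoop_getElem? : ∀ (fuel : Nat) (regs : List Int) (max_i i : Int) (j : Nat),
    0 < regs.length →
    (bmLoop regs max_i (fuel : Int) i fuel)[j]? =
      regs[j]?.map (fun v => v + cnt (regs.length : Int) (max_i + i) (j : Int) fuel) := by
  intro fuel
  induction fuel with
  | zero =>
    intro regs max_i i j _
    simp [bmLoop, cnt]
  | succ f ih =>
    intro regs max_i i j hlen
    have hn : (0:Int) < (regs.length : Int) := by exact_mod_cast hlen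
    have hpos : ((f + 1 : Nat) : Int) > 0 := by push_cast; omega
    have hidx0 : 0 ≤ PySem.Int.mod (max_i + i) (regs.length : Int) :=
      PySem.Int.mod_nonneg _ hn
    have hidx1 : PySem.Int.mod (max_i + i) (regs.length : Int) < (regs.length : Int) :=
      PySem.Int.mod_lt _ hn
    set ix := PySem.Int.mod (max_i + i) (regs.length : Int) with hix
    have hixlt : ix.toNat < regs.length := by omega
    have hstep : ((f + 1 : Nat) : Int) - 1 = (f : Int) := by push_cast; ring
    simp only [bmLoop, if_pos hpos, hstep]
    rw [PySem.List.pySetD_of_nonneg _ _ hidx0]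
    have hlen' : 0 < (regs.set ix.toNat (PySem.List.pyGetD regs ix 0 + 1)).length := by
      simpa using hlen
    rw [ih _ max_i (i + 1) j hlen']
    have hgd : PySem.List.pyGetD regs ix 0 = regs[ix.toNat] := by
      rw [PySem.List.pyGetD_of_nonneg _ _ hidx0, List.getD_eq_getElem _ _ hixlt]
    have hsplus : max_i + (i + 1) = (max_i + i) + 1 := by ring
    simp only [List.length_set, List.getElem?_set, hsplus]
    by_cases hj : ix.toNat = j
    · subst hj
      have hcond : PySem.Int.mod (max_i + i) (regs.length : Int) = ((ix.toNat : Nat) : Int) := by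
        omega
      simp only [if_pos hixlt, List.getElem?_eq_getElem hixlt, hgd,
        Option.map_some, cnt, hcond, Option.some.injEq, if_true]
      ring
    · have hcond : ¬ (PySem.Int.mod (max_i + i) (regs.length : Int) = ((j : Nat) : Int)) := by
        omega
      simp only [if_neg hj, cnt, if_neg hcond]
      cases hjl : regs[j]? with
      | none => simp
      | some v => simp only [Option.map_some, Option.some.injEq]; ring

lemma cnt_closed : ∀ (b : Nat) (s j n : Int), 0 < n → 0 ≤ j → j < n →
    cnt n s j b = PySem.Int.floordiv ((b : Int) + n - 1 - PySem.Int.mod (j - s) n) n := by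
  intro b
  induction b with
  | zero =>
    intro s j n hn hj0 hjn
    have ht0 : 0 ≤ PySem.Int.mod (j - s) n := PySem.Int.mod_nonneg _ hn
    have ht1 : PySem.Int.mod (j - s) n < n := PySem.Int.mod_lt _ hn
    rw [PySem.Int.floordiv_eq_ediv_of_pos hn]
    rw [Int.ediv_eq_zero_of_lt (by omega) (by omega)]
    rfl
  | succ b ih =>
    intro s j n hn hj0 hjn
    have hmodeq := PySem.Int.mod_eq_emod_of_pos (a := j - s) hn
    have hmodeq' := PySem.Int.mod_eq_emod_of_pos (a := j - s - 1) hn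
    have hmodeqs := PySem.Int.mod_eq_emod_of_pos (a := s) hn
    have ht0 : 0 ≤ (j - s) % n := Int.emod_nonneg _ (by omega)
    have ht1 : (j - s) % n < n := Int.emod_lt_of_pos _ hn
    have hjj : j % n = j := Int.emod_eq_of_lt hj0 hjn
    have hcond : (PySem.Int.mod s n = j) ↔ ((j - s) % n = 0) := by
      rw [hmodeqs]
      have key : s % n = j % n ↔ (s - j) % n = 0 := Int.emod_eq_emod_iff_emod_sub_eq_zero
      constructor
      · intro h
        have h2 : (s - j) % n = 0 := key.mp (by rw [h, hjj])
        have hd : n ∣ (s - j) := Int.dvd_of_emod_eq_zero h2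
        have hd2 : n ∣ (j - s) := by
          rw [show j - s = -(s - j) by ring]
          exact dvd_neg.mpr hd
        exact Int.emod_eq_zero_of_dvd hd2
      · intro h
        have hd : n ∣ (j - s) := Int.dvd_of_emod_eq_zero h
        have h2 : (s - j) % n = 0 := by
          apply Int.emod_eq_zero_of_dvd
          rw [show s - j = -(j - s) by ring]
          exact dvd_neg.mpr hd
        have := key.mpr h2
        rwa [hjj] at this
    have hcnt : cnt n s j (b + 1) = (if PySem.Int.mod s n = j then 1 else 0) + cnt n (s + 1) j b := rfl
    rw [hcnt, ih (s + 1) j n hn hj0 hjn]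
    rw [PySem.Int.floordiv_eq_ediv_of_pos hn, PySem.Int.floordiv_eq_ediv_of_pos hn]
    have hsub : j - (s + 1) = j - s - 1 := by ring
    rw [hsub, hmodeq, hmodeq']
    by_cases h0 : (j - s) % n = 0
    · have hd : n ∣ (j - s) := Int.dvd_of_emod_eq_zero h0
      obtain ⟨k, hk⟩ := hd
      have ht' : (j - s - 1) % n = n - 1 := by
        rw [hk, show n * k - 1 = (n - 1) + n * (k - 1) by ring, Int.add_mul_emod_self_left]
        exact Int.emod_eq_of_lt (by omega) (by omega)
      rw [ht', h0, if_pos (hcond.mpr h0)]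
      have : ((b : Int)) + n - 1 - (n - 1) = (b : Int) := by ring
      rw [this]
      have : ((b + 1 : Nat) : Int) + n - 1 - 0 = (b : Int) + n * 1 := by push_cast; ring
      rw [this, Int.add_mul_ediv_left _ _ (by omega : n ≠ 0)]
      ring
    · have ht' : (j - s - 1) % n = (j - s) % n - 1 := by
        have hd : n ∣ (j - s - (j - s) % n) := by
          have := Int.mul_ediv_add_emod (j - s) n
          exact ⟨(j - s) / n, by linarith⟩
        obtain ⟨k, hk⟩ := hd
        rw [show j - s - 1 = ((j - s) % n - 1) + n * k by omega, Int.add_mul_emod_self_left]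
        exact Int.emod_eq_of_lt (by omega) (by omega)
      rw [ht', if_neg (fun h => h0 (hcond.mp h))]
      have : ((b : Int)) + n - 1 - ((j - s) % n - 1) = ((b + 1 : Nat) : Int) + n - 1 - (j - s) % n := by
        push_cast; ring
      rw [this]
      ring

lemma key_div : ∀ (n t b : Int), 0 < n → 0 ≤ t → t < n → 0 ≤ b →
    PySem.Int.floordiv (b + n - 1 - t) n =
      PySem.Int.floordiv b n +
        (if 1 ≤ PySem.Int.mod (t + 1) n ∧ PySem.Int.mod (t + 1) n ≤ PySem.Int.mod b n then 1 else 0) := by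
  intro n t b hn ht0 ht1 hb
  rw [PySem.Int.floordiv_eq_ediv_of_pos hn, PySem.Int.floordiv_eq_ediv_of_pos hn,
    PySem.Int.mod_eq_emod_of_pos hn, PySem.Int.mod_eq_emod_of_pos hn]
  have hr0 : 0 ≤ b % n := Int.emod_nonneg _ (by omega)
  have hr1 : b % n < n := Int.emod_lt_of_pos _ hn
  have hbqr := Int.mul_ediv_add_emod b n
  by_cases hend : t = n - 1
  · subst hend
    have : (n - 1 : Int) + 1 = n := by ring
    rw [this, Int.emod_self]
    rw [if_neg (by omega)]
    have : b + n - 1 - (n - 1) = b := by ring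
    rw [this]; ring
  · have htn : t + 1 < n := by omega
    have ht1' : (t + 1) % n = t + 1 := Int.emod_eq_of_lt (by omega) htn
    rw [ht1']
    have hnum : b + n - 1 - t = (b % n + n - 1 - t) + n * (b / n) := by linarith
    rw [hnum, Int.add_mul_ediv_left _ _ (by omega : n ≠ 0)]
    by_cases hc : t + 1 ≤ b % n
    · rw [if_pos ⟨by omega, hc⟩]
      have : b % n + n - 1 - t = (b % n - 1 - t) + n * 1 := by ring
      rw [this, Int.add_mul_ediv_left _ _ (by omega : n ≠ 0),
        Int.ediv_eq_zero_of_lt (by omega) (by omega)]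
      ring
    · rw [if_neg (by omega)]
      rw [Int.ediv_eq_zero_of_lt (by omega) (by omega)]
      ring

-- per-index identity: blocks dealt one-by-one from max_i+1 = blocks//n + (one extra for the
-- first blocks%n positions after max_i)
lemma cnt_eq (nI mi b : Int) (j : Nat) (hn : 0 < nI) (hj : ((j : Nat) : Int) < nI) (hb : 0 ≤ b) :
    cnt nI (mi + 1) ((j : Nat) : Int) b.toNat
      = PySem.Int.floordiv b nI +
        (if 1 ≤ PySem.Int.mod (((j : Nat) : Int) - mi) nI ∧
              PySem.Int.mod (((j : Nat) : Int) - mi) nI ≤ PySem.Int.mod b nI then 1 else 0) := by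
  have hj0 : (0:Int) ≤ ((j : Nat) : Int) := by positivity
  rw [cnt_closed b.toNat (mi + 1) _ nI hn hj0 hj, Int.toNat_of_nonneg hb]
  have hsub : ((j : Nat) : Int) - (mi + 1) = ((j : Nat) : Int) - mi - 1 := by ring
  rw [hsub]
  set t0 := PySem.Int.mod (((j : Nat) : Int) - mi - 1) nI with ht0
  have ht00 : 0 ≤ t0 := PySem.Int.mod_nonneg _ hn
  have ht01 : t0 < nI := PySem.Int.mod_lt _ hn
  rw [key_div nI t0 b hn ht00 ht01 hb]
  have hmodsh : PySem.Int.mod (t0 + 1) nI = PySem.Int.mod (((j : Nat) : Int) - mi) nI := by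
    rw [PySem.Int.mod_eq_emod_of_pos hn, PySem.Int.mod_eq_emod_of_pos hn, ht0,
      PySem.Int.mod_eq_emod_of_pos hn]
    apply Int.emod_eq_emod_iff_emod_sub_eq_zero.mpr
    have e : (((j : Nat) : Int) - mi - 1) % nI + 1 - (((j : Nat) : Int) - mi)
        = (((j : Nat) : Int) - mi - 1) % nI - (((j : Nat) : Int) - mi - 1) := by ring
    rw [e]
    exact emod_sub_self_emod _ _
  rw [hmodsh]

-- A's enumerate-fold: running max (seeded mx) together with the first strictly-improving index
lemma foldA_spec : ∀ (xs : List Int) (s mx mi : Int),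
    (PySem.List.enumerate xs s).foldl
        (fun (st : Int × Int) p => if p.2 > st.1 then (p.2, p.1) else st) (mx, mi)
      = (xs.foldl max mx,
          if xs.all (fun x => decide (x ≤ mx)) then mi
          else s + (((PySem.List.index? xs (xs.foldl max mx)).getD 0 : Nat) : Int)) := by
  intro xs
  induction xs with
  | nil => intro s mx mi; simp [PySem.List.enumerate_nil]
  | cons x t ih =>
    intro s mx mi
    rw [PySem.List.enumerate_cons, List.foldl_cons]
    have hred : (if (s, x).2 > (mx, mi).1 then ((s, x).2, (s, x).1) else (mx, mi))
        = if x > mx then (x, s) else (mx, mi) := rfl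
    rw [hred]
    by_cases hx : x > mx
    · rw [if_pos hx, ih (s + 1) x s]
      have hmax : max mx x = x := max_eq_right (le_of_lt hx)
      have hfold : (x :: t).foldl max mx = t.foldl max x := by
        rw [List.foldl_cons, hmax]
      have hallc : (x :: t).all (fun y => decide (y ≤ mx)) = false := by
        simp [List.all_cons]
        intro h; omega
      rw [hfold, hallc]
      simp only [Bool.false_eq_true, if_false]
      by_cases hall : t.all (fun y => decide (y ≤ x))
      · rw [if_pos hall]
        have hM : t.foldl max x = x := by
          rcases PySem.List.foldl_max_mem t x with h | h
          · exact h
          · have hle := List.all_eq_true.mp hall _ h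
            exact le_antisymm (by simpa using hle) (PySem.List.le_foldl_max t x).1
        rw [hM, PySem.List.index?_cons_self]
        simp
      · rw [if_neg hall]
        obtain ⟨y, hy, hylt⟩ : ∃ y ∈ t, x < y := by
          by_contra hcon
          push_neg at hcon
          exact hall (List.all_eq_true.mpr fun y hy => by simpa using hcon y hy)
        have hgt : x < t.foldl max x := lt_of_lt_of_le hylt ((PySem.List.le_foldl_max t x).2 y hy)
        have hmem : t.foldl max x ∈ t := by
          rcases PySem.List.foldl_max_mem t x with h | h
          · omega
          · exact h
        have hne : x ≠ t.foldl max x := by omega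
        rw [PySem.List.index?_cons_of_ne _ hne]
        obtain ⟨k, hk⟩ := Option.isSome_iff_exists.mp ((PySem.List.index?_isSome_iff _ _).mpr hmem)
        rw [hk]
        simp only [Option.map_some, Option.getD_some]
        rw [Prod.mk.injEq]
        constructor
        · rfl
        · push_cast; ring
    · rw [if_neg hx]
      rw [ih (s + 1) mx mi]
      have hxle : x ≤ mx := by omega
      have hmax : max mx x = mx := max_eq_left hxle
      have hfold : (x :: t).foldl max mx = t.foldl max mx := by
        rw [List.foldl_cons, hmax]
      have hallc : (x :: t).all (fun y => decide (y ≤ mx)) = t.all (fun y => decide (y ≤ mx)) := by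
        simp [List.all_cons, hxle]
      rw [hfold, hallc]
      by_cases hall : t.all (fun y => decide (y ≤ mx))
      · rw [if_pos hall, if_pos hall]
      · rw [if_neg hall, if_neg hall]
        obtain ⟨y, hy, hylt⟩ : ∃ y ∈ t, mx < y := by
          by_contra hcon
          push_neg at hcon
          exact hall (List.all_eq_true.mpr fun y hy => by simpa using hcon y hy)
        have hgt : mx < t.foldl max mx := lt_of_lt_of_le hylt ((PySem.List.le_foldl_max t mx).2 y hy)
        have hmem : t.foldl max mx ∈ t := by
          rcases PySem.List.foldl_max_mem t mx with h | h
          · omega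
          · exact h
        have hne : x ≠ t.foldl max mx := by omega
        rw [PySem.List.index?_cons_of_ne _ hne]
        obtain ⟨k, hk⟩ := Option.isSome_iff_exists.mp ((PySem.List.index?_isSome_iff _ _).mpr hmem)
        rw [hk]
        simp only [Option.map_some, Option.getD_some]
        rw [Prod.mk.injEq]
        constructor
        · rfl
        · push_cast; ring

lemma foldl_max_max (t : List Int) : ∀ a b : Int, t.foldl max (max a b) = max a (t.foldl max b) := by
  induction t with
  | nil => intro a b; simp
  | cons x t ih => intro a b; simp only [List.foldl_cons, max_assoc]; exact ih a (max b x)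

-- when some register is positive, or all are nonnegative, A's find_max_index is the
-- first index of the maximum
lemma max_i_eq (x : Int) (t : List Int)
    (hpre : (∃ y ∈ x :: t, 0 < y) ∨ ∀ y ∈ x :: t, 0 ≤ y) :
    find_max_index (x :: t) =
      (((PySem.List.index? (x :: t) ((PySem.List.max? (x :: t) (fun y => y)).getD 0)).getD 0 : Nat) : Int) := by
  rw [PySem.List.max?_id_cons]
  simp only [Option.getD_some]
  unfold find_max_index
  rw [foldA_spec (x :: t) 0 0 0]
  have hub : ∀ y ∈ x :: t, y ≤ t.foldl max x := by
    intro y hy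
    rcases List.mem_cons.mp hy with h | h
    · rw [h]; exact (PySem.List.le_foldl_max t x).1
    · exact (PySem.List.le_foldl_max t x).2 y h
  by_cases hall : (x :: t).all (fun y => decide (y ≤ (0:Int)))
  · -- all elements are 0
    rw [if_pos hall]
    have hz : ∀ y ∈ x :: t, y = 0 := by
      intro y hy
      have h1 := List.all_eq_true.mp hall _ hy
      simp at h1
      rcases hpre with ⟨z, hz, hzpos⟩ | hnn
      · have := List.all_eq_true.mp hall _ hz
        simp at this
        omega
      · have h2 := hnn y hy
        omega
    have hxz : x = 0 := hz x List.mem_cons_self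
    have hmz : t.foldl max x = 0 := by
      rcases PySem.List.foldl_max_mem t x with h | h
      · rw [h, hxz]
      · exact hz _ (List.mem_cons_of_mem _ h)
    rw [hmz]
    have hidx : PySem.List.index? (x :: t) (0:Int) = some 0 := by
      rw [hxz, PySem.List.index?_cons_self]
    rw [hidx]
    simp
  · rw [if_neg hall]
    have hM0 : (x :: t).foldl max 0 = t.foldl max x := by
      rw [List.foldl_cons, foldl_max_max t 0 x]
      obtain ⟨y, hy, hypos⟩ : ∃ y ∈ x :: t, 0 < y := by
        by_contra hcon
        push_neg at hcon
        exact hall (List.all_eq_true.mpr fun y hy => by simpa using hcon y hy)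
      have := hub y hy
      omega
    rw [hM0]
    simp

-- ===== VERDICT (by name: the statement is the Claim_ definition above) =====
theorem balance_memory_spec : Claim_equal_balance_memory := by
  unfold Claim_equal_balance_memory
  intro registers _ hpre
  unfold Spec_balance_memory
  unfold Pre_balance_memory at hpre
  obtain ⟨hne, hnn⟩ := hpre
  cases registers with
  | nil => exact absurd rfl hne
  | cons x t =>
    have hn : 0 < (x :: t).length := by simp
    have hnI : (0:Int) < ((x :: t).length : Int) := by exact_mod_cast hn
    simp only [balance_memory, balance_memory_alt, max_i_eq x t hnn]
    set m := (PySem.List.max? (x :: t) fun y => y).getD 0 with hm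
    have hmval : m = t.foldl max x := by rw [hm, PySem.List.max?_id_cons, Option.getD_some]
    have hmmem : m ∈ x :: t := by
      rw [hmval]
      rcases PySem.List.foldl_max_mem t x with h | h
      · rw [h]; exact List.mem_cons_self
      · exact List.mem_cons_of_mem _ h
    have hm0 : 0 ≤ m := by
      rcases hnn with ⟨y, hy, hypos⟩ | hnn
      · have hle : y ≤ m := by
          rw [hmval]
          rcases List.mem_cons.mp hy with h | h
          · rw [h]; exact (PySem.List.le_foldl_max t x).1
          · exact (PySem.List.le_foldl_max t x).2 y h
        omega
      · exact hnn m hmmem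
    obtain ⟨k, hk⟩ := Option.isSome_iff_exists.mp ((PySem.List.index?_isSome_iff _ _).mpr hmmem)
    obtain ⟨hklt, hkval, -⟩ := PySem.List.getElem_of_index?_eq_some hk
    rw [hk]
    simp only [Option.getD_some]
    have hget : (PySem.List.pyGet? (x :: t) ((k : Nat) : Int)).getD 0 = m := by
      rw [PySem.List.pyGet?_natCast, List.getElem?_eq_getElem hklt, hkval]
      rfl
    rw [hget]
    set regs := PySem.List.pySetD (x :: t) ((k : Nat) : Int) 0 with hregs
    have hlenr : regs.length = (x :: t).length := PySem.List.length_pySetD _ _ _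
    have hlenr0 : 0 < regs.length := by omega
    have hmt : ((m.toNat : Nat) : Int) = m := Int.toNat_of_nonneg hm0
    apply List.ext_getElem?
    intro j
    have hL := bmLoop_getElem? m.toNat regs ((k : Nat) : Int) 1 j hlenr0
    rw [hmt] at hL
    rw [hL, List.getElem?_map, PySem.List.getElem?_enumerate]
    cases hjl : regs[j]? with
    | none => simp
    | some v =>
      have hjlt : j < regs.length := by
        by_contra hge
        rw [List.getElem?_eq_none (by omega)] at hjl
        simp at hjl
      simp only [Option.map_some, Option.some.injEq, zero_add]
      have hjlt' : j < (x :: t).length := by omega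
      have hjI : ((j : Nat) : Int) < ((x :: t).length : Int) := by exact_mod_cast hjlt'
      rw [hlenr]
      rw [cnt_eq ((x :: t).length : Int) ((k : Nat) : Int) m j hnI hjI hm0]
      exact (add_assoc v _ _).symm
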